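-- pv_equiv track=rewrite | github.com/NS-Team-Project-Fall-2025/NS-Test | backend/tutor/services/summarizer.py | _extract_index
-- ===== SOURCE A (Python) =====
-- from typing import Dict, Generator, List, Optional
--
-- ORDINAL_WORDS = {
--     "first": 1,
--     "second": 2,
--     "third": 3,
--     "fourth": 4,
--     "fifth": 5,
--     "sixth": 6,
--     "seventh": 7,
--     "eighth": 8,
--     "ninth": 9,
--     "tenth": 10,
-- }
--
-- def _extract_index(tokens: List[str]) -> Optional[int]:
--     for token in tokens:
--         if token.isdigit():
--             try:
--                 return int(token)
--             except Exception:
--                 continue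
--     for token in tokens:
--         if token in ORDINAL_WORDS:
--             return ORDINAL_WORDS[token]
--     return None
-- ===== SOURCE B (Python) =====
-- ORDINAL_WORDS = {
--     "first": 1,
--     "second": 2,
--     "third": 3,
--     "fourth": 4,
--     "fifth": 5,
--     "sixth": 6,
--     "seventh": 7,
--     "eighth": 8,
--     "ninth": 9,
--     "tenth": 10,
-- }
--
-- def _extract_index(tokens):
--     # single pass: first digit token wins immediately; otherwise the first
--     # ordinal word seen is remembered and returned after the loop.
--     ordinal = None
--     for token in tokens:
--         if token.isdigit():
--             try:
--                 return int(token)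
--             except Exception:
--                 pass  # non-decimal digit character (e.g. '²'); never an ordinal word
--         if ordinal is None and token in ORDINAL_WORDS:
--             ordinal = ORDINAL_WORDS[token]
--     return ordinal
-- ===== Notes on version B (the rewrite author's own statement) =====
-- stated objective: alternative
-- what changed: A's two sequential scans (first for a digit token, then for an ordinal word) are merged into a single pass that returns int(token) at the first digit token and otherwise remembers the first ordinal word's value in an accumulator returned after the loop.
import Mathlib
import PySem

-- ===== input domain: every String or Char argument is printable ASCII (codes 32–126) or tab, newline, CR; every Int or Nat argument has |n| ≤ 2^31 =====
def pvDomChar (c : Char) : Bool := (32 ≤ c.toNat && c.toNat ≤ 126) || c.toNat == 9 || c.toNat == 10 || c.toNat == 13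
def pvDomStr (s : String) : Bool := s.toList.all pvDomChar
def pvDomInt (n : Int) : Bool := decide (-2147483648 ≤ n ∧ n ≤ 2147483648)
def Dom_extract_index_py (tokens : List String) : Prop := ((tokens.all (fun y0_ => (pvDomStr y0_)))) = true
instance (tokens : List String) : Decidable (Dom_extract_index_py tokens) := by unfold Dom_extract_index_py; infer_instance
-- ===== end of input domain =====

-- B merges A's two sequential scans into one pass that returns the first digit token's value
-- immediately and remembers the first ordinal word for the no-digit case (objective: alternative decomposition).


-- ===== PORT A =====
def ordinalWords : PySem.Dict String Int :=
  PySem.Dict.ofList [("first", 1), ("second", 2), ("third", 3), ("fourth", 4), ("fifth", 5),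
    ("sixth", 6), ("seventh", 7), ("eighth", 8), ("ninth", 9), ("tenth", 10)]

-- first loop of A: first digit token, converted (int() failure caught → continue)
def extractLoop1 : List String → Option Int
  | [] => none
  | t :: ts =>
    if PySem.Str.strIsdigit t then
      match PySem.Int.ofStr? t with
      | some n => some n
      | none => extractLoop1 ts
    else extractLoop1 ts

-- second loop of A: first ordinal word ('token in ORDINAL_WORDS' then index = get?)
def extractLoop2 : List String → Option Int
  | [] => none
  | t :: ts =>
    match ordinalWords.get? t with
    | some v => some v
    | none => extractLoop2 ts

def extract_index_py (tokens : List String) : Option Int :=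
  match extractLoop1 tokens with
  | some n => some n
  | none => extractLoop2 tokens

-- ===== PORT B =====
-- single pass; 'ordinal' accumulator holds the first ordinal word's value seen so far
def extractAltLoop : List String → Option Int → Option Int
  | [], ordinal => ordinal
  | t :: ts, ordinal =>
    if PySem.Str.strIsdigit t then
      match PySem.Int.ofStr? t with
      | some n => some n
      | none => extractAltLoop ts (if ordinal.isNone then ordinalWords.get? t else ordinal)
    else extractAltLoop ts (if ordinal.isNone then ordinalWords.get? t else ordinal)

def extract_index_py_alt (tokens : List String) : Option Int :=
  extractAltLoop tokens none

-- ===== PRECONDITION & SPEC =====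
def Spec_extract_index_py (tokens : List String) (out : Option Int) : Prop := out = extract_index_py_alt tokens
instance (tokens : List String) (out : Option Int) : Decidable (Spec_extract_index_py tokens out) := by unfold Spec_extract_index_py; infer_instance

-- ===== CLAIM (what is proved, stated in full; the proofs are below) =====
def Claim_equal_extract_index_py : Prop := ∀ (tokens : List String), Dom_extract_index_py tokens → Spec_extract_index_py tokens (extract_index_py tokens)

-- ===== LEMMAS AND PROOFS =====

-- an all-digit token is never an ordinal word (every key contains a letter)
theorem get?_ordinal_of_isdigit (t : String) (h : PySem.Str.strIsdigit t = true) :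
    ordinalWords.get? t = none := by
  have hd : ∀ c ∈ t.toList, PySem.Chars.isdigit c = true := by
    rw [PySem.Str.strIsdigit_eq, PySem.Chars.strIsdigit, Bool.and_eq_true, List.all_eq_true] at h
    exact fun c hc => h.2 c hc
  have hne : ∀ (w : String), w.toList.any (fun c => !PySem.Chars.isdigit c) = true → (w == t) = false := by
    intro w hw
    rw [List.any_eq_true] at hw
    obtain ⟨c, hc, hcd⟩ := hw
    rw [beq_eq_false_iff_ne]
    rintro rfl
    have := hd c hc
    simp [this] at hcd
  have hords : ordinalWords = PySem.Dict.mk [("first", 1), ("second", 2), ("third", 3), ("fourth", 4),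
      ("fifth", 5), ("sixth", 6), ("seventh", 7), ("eighth", 8), ("ninth", 9), ("tenth", 10)] := by
    decide
  rw [hords]
  simp only [PySem.Dict.get?_mk_cons,
    hne "first" (by decide), hne "second" (by decide), hne "third" (by decide),
    hne "fourth" (by decide), hne "fifth" (by decide), hne "sixth" (by decide),
    hne "seventh" (by decide), hne "eighth" (by decide), hne "ninth" (by decide),
    hne "tenth" (by decide)]
  rfl

-- loop invariant: B's single pass equals A's two-pass structure with the accumulator in between
theorem altLoop_eq (ts : List String) : ∀ acc : Option Int,
    extractAltLoop ts acc =
      match extractLoop1 ts with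
      | some n => some n
      | none =>
        match acc with
        | some v => some v
        | none => extractLoop2 ts := by
  induction ts with
  | nil => intro acc; cases acc <;> rfl
  | cons t ts ih =>
    intro acc
    by_cases hdig : PySem.Str.strIsdigit t = true
    all_goals have hdig' := hdig
    all_goals rw [PySem.Str.strIsdigit_eq] at hdig'
    · have hget : ordinalWords.get? t = none := get?_ordinal_of_isdigit t hdig
      cases hconv : PySem.Int.ofStr? t with
      | some n =>
        simp [extractAltLoop, extractLoop1, hdig', hconv]
      | none =>
        simp only [extractAltLoop, extractLoop1, extractLoop2, PySem.Str.strIsdigit_eq, hdig',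
          if_pos, hconv, hget]
        rw [show (if acc.isNone = true then none else acc) = acc from by cases acc <;> rfl]
        exact ih acc
    · simp only [extractAltLoop, extractLoop1, extractLoop2, PySem.Str.strIsdigit_eq,
        if_neg hdig']
      rw [ih]
      cases hacc : acc with
      | some v => simp
      | none =>
        cases hget : ordinalWords.get? t with
        | some v => cases extractLoop1 ts <;> simp
        | none => cases extractLoop1 ts <;> simp

-- ===== VERDICT (by name: the statement is the Claim_ definition above) =====
theorem extract_index_py_spec : Claim_equal_extract_index_py := by
  intro tokens _
  unfold Spec_extract_index_py extract_index_py extract_index_py_alt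
  rw [altLoop_eq]
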